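-- pv_equiv track=rewrite | github.com/pascaldisse/open-sourcefy | src/core/ai_enhancement.py | _extract_memory_patterns
-- ===== SOURCE A (Python) =====
-- from typing import Dict, Any, List, Tuple, Optional
--
-- def _extract_memory_patterns(code_data: Dict[str, Any]) -> Dict[str, Any]:
--     """Extract memory access patterns"""
--     patterns = {
--         'stack_access': 0,
--         'heap_access': 0,
--         'global_access': 0,
--         'indirect_access': 0
--     }
--
--     objdump_data = code_data.get('objdump_output', {})
--     if objdump_data and 'functions' in objdump_data:
--         for func in objdump_data['functions']:
--             instructions = func.get('instructions', [])
--             for inst in instructions: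
--                 if '%esp' in inst or '%ebp' in inst:
--                     patterns['stack_access'] += 1
--                 elif '[' in inst and ']' in inst:
--                     patterns['indirect_access'] += 1
--                 elif 'malloc' in inst or 'free' in inst:
--                     patterns['heap_access'] += 1
--
--     return patterns
-- ===== SOURCE B (Python) =====
-- from typing import Dict, Any, List, Tuple, Optional
--
--
-- def _extract_memory_patterns(code_data: Dict[str, Any]) -> Dict[str, Any]:
--     """Extract memory access patterns"""
--     objdump_data = code_data.get('objdump_output', {})
--     insts = []
--     if objdump_data and 'functions' in objdump_data:
--         for func in objdump_data['functions']:
--             insts.extend(func.get('instructions', []))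
--     # staged sieves: each filter removes the instructions already counted by an
--     # earlier (higher-priority) bucket, so the elif priority falls out of the order
--     # of the sieves and each bucket's count is a difference of survivor lengths
--     rest1 = [i for i in insts if '%esp' not in i and '%ebp' not in i]
--     rest2 = [i for i in rest1 if not ('[' in i and ']' in i)]
--     heap = [i for i in rest2 if 'malloc' in i or 'free' in i]
--     return {
--         'stack_access': len(insts) - len(rest1),
--         'heap_access': len(heap),
--         'global_access': 0,
--         'indirect_access': len(rest1) - len(rest2),
--     }
-- ===== Notes on version B (the rewrite author's own statement) =====
-- stated objective: alternative
-- what changed: Replaces the per-instruction elif chain mutating a counter dict with staged whole-list sieves: flatten all instructions once, then successively filter out stack, then indirect, then heap matches, and read each bucket off as a difference of survivor-list lengths (global_access stays a literal 0).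
import Mathlib
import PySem

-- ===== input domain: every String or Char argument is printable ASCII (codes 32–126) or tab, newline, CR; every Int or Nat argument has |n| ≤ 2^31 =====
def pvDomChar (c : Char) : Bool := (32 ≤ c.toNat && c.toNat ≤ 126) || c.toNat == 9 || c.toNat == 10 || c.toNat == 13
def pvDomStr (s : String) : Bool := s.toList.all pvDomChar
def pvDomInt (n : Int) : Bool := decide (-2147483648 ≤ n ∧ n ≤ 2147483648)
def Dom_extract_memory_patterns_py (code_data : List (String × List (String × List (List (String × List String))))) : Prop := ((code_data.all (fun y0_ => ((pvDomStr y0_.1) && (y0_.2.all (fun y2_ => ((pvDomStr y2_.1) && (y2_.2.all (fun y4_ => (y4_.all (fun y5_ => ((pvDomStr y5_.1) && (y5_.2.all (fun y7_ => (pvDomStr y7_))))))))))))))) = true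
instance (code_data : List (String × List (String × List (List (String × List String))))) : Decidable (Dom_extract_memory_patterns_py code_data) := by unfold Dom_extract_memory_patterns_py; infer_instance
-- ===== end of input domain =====

-- B replaces A's per-instruction elif chain over a mutated counter dict by staged
-- whole-list sieves (filter out stack, then indirect, then heap) and reads each
-- bucket off as a difference of survivor-list lengths (alternative decomposition).


-- ===== PORT A =====
-- one instruction updates the patterns dict: A's elif chain, verbatim ('patterns[k] += 1' is Dict.modify)
def pvStepA (pats : PySem.Dict String Int) (inst : String) : PySem.Dict String Int :=
  if PySem.Str.isIn "%esp" inst || PySem.Str.isIn "%ebp" inst then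
    pats.modify "stack_access" 0 (· + 1)
  else if PySem.Str.isIn "[" inst && PySem.Str.isIn "]" inst then
    pats.modify "indirect_access" 0 (· + 1)
  else if PySem.Str.isIn "malloc" inst || PySem.Str.isIn "free" inst then
    pats.modify "heap_access" 0 (· + 1)
  else pats

def extract_memory_patterns_py (code_data : List (String × List (String × List (List (String × List String))))) : List (String × Int) :=
  let patterns : PySem.Dict String Int :=
    PySem.Dict.mk [("stack_access", 0), ("heap_access", 0), ("global_access", 0), ("indirect_access", 0)]
  let objdump_data := (PySem.Dict.mk code_data).getD "objdump_output" []
  if objdump_data ≠ [] ∧ (PySem.Dict.mk objdump_data).contains "functions" = true then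
    -- objdump_data['functions']: the guard ensures the key is present, so getD [] is exactly the lookup
    let funcs := (PySem.Dict.mk objdump_data).getD "functions" []
    (funcs.foldl (fun pats func =>
        ((PySem.Dict.mk func).getD "instructions" []).foldl pvStepA pats) patterns).items
  else patterns.items

-- ===== PORT B =====
-- the three sieve predicates of Source B's comprehensions
def pvIsStack (i : String) : Bool := PySem.Str.isIn "%esp" i || PySem.Str.isIn "%ebp" i
def pvIsInd (i : String) : Bool := PySem.Str.isIn "[" i && PySem.Str.isIn "]" i
def pvIsHeap (i : String) : Bool := PySem.Str.isIn "malloc" i || PySem.Str.isIn "free" i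

def extract_memory_patterns_py_alt (code_data : List (String × List (String × List (List (String × List String))))) : List (String × Int) :=
  let objdump_data := (PySem.Dict.mk code_data).getD "objdump_output" []
  -- 'insts.extend(...)' loop
  let insts : List String :=
    if objdump_data ≠ [] ∧ (PySem.Dict.mk objdump_data).contains "functions" = true then
      ((PySem.Dict.mk objdump_data).getD "functions" []).foldl
        (fun acc func => acc ++ (PySem.Dict.mk func).getD "instructions" []) []
    else []
  -- staged sieves
  let rest1 := insts.filter (fun i => !pvIsStack i)
  let rest2 := rest1.filter (fun i => !pvIsInd i)
  let heap := rest2.filter (fun i => pvIsHeap i)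
  [("stack_access", (insts.length : Int) - (rest1.length : Int)),
   ("heap_access", (heap.length : Int)),
   ("global_access", 0),
   ("indirect_access", (rest1.length : Int) - (rest2.length : Int))]

-- ===== PRECONDITION & SPEC =====
def Spec_extract_memory_patterns_py (code_data : List (String × List (String × List (List (String × List String))))) (out : List (String × Int)) : Prop := out = extract_memory_patterns_py_alt code_data
instance (code_data : List (String × List (String × List (List (String × List String))))) (out : List (String × Int)) : Decidable (Spec_extract_memory_patterns_py code_data out) := by unfold Spec_extract_memory_patterns_py; infer_instance

-- ===== CLAIM =====
def Claim_equal_extract_memory_patterns_py : Prop := ∀ (code_data : List (String × List (String × List (List (String × List String))))), Dom_extract_memory_patterns_py code_data → Spec_extract_memory_patterns_py code_data (extract_memory_patterns_py code_data)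

-- ===== LEMMAS AND PROOFS =====

-- A's inner loop on one instruction list, on a general 4-entry patterns dict, expressed
-- through B's sieve quantities on that list.
lemma pv_inner (insts : List String) (a b c e : Int) :
    insts.foldl pvStepA
      (PySem.Dict.mk [("stack_access", a), ("heap_access", b), ("global_access", c), ("indirect_access", e)]) =
    PySem.Dict.mk
      [("stack_access", a + ((insts.length : Int) - ((insts.filter (fun i => !pvIsStack i)).length : Int))),
       ("heap_access", b + ((((insts.filter (fun i => !pvIsStack i)).filter (fun i => !pvIsInd i)).filter (fun i => pvIsHeap i)).length : Int)),
       ("global_access", c),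
       ("indirect_access", e + (((insts.filter (fun i => !pvIsStack i)).length : Int) - (((insts.filter (fun i => !pvIsStack i)).filter (fun i => !pvIsInd i)).length : Int)))] := by
  induction insts generalizing a b c e with
  | nil => simp
  | cons x xs ih =>
    rw [List.foldl_cons]
    by_cases h1 : pvIsStack x = true
    · rw [show pvStepA (PySem.Dict.mk [("stack_access", a), ("heap_access", b), ("global_access", c), ("indirect_access", e)]) x
          = PySem.Dict.mk [("stack_access", a + 1), ("heap_access", b), ("global_access", c), ("indirect_access", e)] from by
          unfold pvStepA; rw [if_pos (by simpa [pvIsStack] using h1)]; rfl]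
      rw [ih,
        show List.filter (fun i => !pvIsStack i) (x :: xs) = List.filter (fun i => !pvIsStack i) xs from by
          rw [List.filter_cons_of_neg (by simp [h1])]]
      simp only [List.length_cons, Nat.cast_add, Nat.cast_one, PySem.Dict.mk.injEq,
        List.cons.injEq, Prod.mk.injEq, true_and, and_true]
      omega
    · have hs : pvIsStack x = false := by simpa using h1
      have e1 : List.filter (fun i => !pvIsStack i) (x :: xs) = x :: List.filter (fun i => !pvIsStack i) xs := by
        rw [List.filter_cons_of_pos (by simp [hs])]
      by_cases h2 : pvIsInd x = true
      · rw [show pvStepA (PySem.Dict.mk [("stack_access", a), ("heap_access", b), ("global_access", c), ("indirect_access", e)]) x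
            = PySem.Dict.mk [("stack_access", a), ("heap_access", b), ("global_access", c), ("indirect_access", e + 1)] from by
            unfold pvStepA
            rw [if_neg (by simpa [pvIsStack] using h1), if_pos (by simpa [pvIsInd] using h2)]; rfl]
        rw [ih, e1,
          show List.filter (fun i => !pvIsInd i) (x :: List.filter (fun i => !pvIsStack i) xs)
              = List.filter (fun i => !pvIsInd i) (List.filter (fun i => !pvIsStack i) xs) from by
            rw [List.filter_cons_of_neg (by simp [h2])]]
        simp only [List.length_cons, Nat.cast_add, Nat.cast_one, PySem.Dict.mk.injEq,
          List.cons.injEq, Prod.mk.injEq, true_and, and_true]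
        omega
      · have hi : pvIsInd x = false := by simpa using h2
        have e2 : List.filter (fun i => !pvIsInd i) (x :: List.filter (fun i => !pvIsStack i) xs)
            = x :: List.filter (fun i => !pvIsInd i) (List.filter (fun i => !pvIsStack i) xs) := by
          rw [List.filter_cons_of_pos (by simp [hi])]
        by_cases h3 : pvIsHeap x = true
        · rw [show pvStepA (PySem.Dict.mk [("stack_access", a), ("heap_access", b), ("global_access", c), ("indirect_access", e)]) x
              = PySem.Dict.mk [("stack_access", a), ("heap_access", b + 1), ("global_access", c), ("indirect_access", e)] from by
              unfold pvStepA
              rw [if_neg (by simpa [pvIsStack] using h1), if_neg (by simpa [pvIsInd] using h2),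
                  if_pos (by simpa [pvIsHeap] using h3)]; rfl]
          rw [ih, e1, e2,
            show List.filter (fun i => pvIsHeap i)
                (x :: List.filter (fun i => !pvIsInd i) (List.filter (fun i => !pvIsStack i) xs))
                = x :: List.filter (fun i => pvIsHeap i)
                    (List.filter (fun i => !pvIsInd i) (List.filter (fun i => !pvIsStack i) xs)) from by
              rw [List.filter_cons_of_pos (by simp [h3])]]
          simp only [List.length_cons, Nat.cast_add, Nat.cast_one, PySem.Dict.mk.injEq,
            List.cons.injEq, Prod.mk.injEq, true_and, and_true]
          omega
        · rw [show pvStepA (PySem.Dict.mk [("stack_access", a), ("heap_access", b), ("global_access", c), ("indirect_access", e)]) x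
              = PySem.Dict.mk [("stack_access", a), ("heap_access", b), ("global_access", c), ("indirect_access", e)] from by
              unfold pvStepA
              rw [if_neg (by simpa [pvIsStack] using h1), if_neg (by simpa [pvIsInd] using h2),
                  if_neg (by simpa [pvIsHeap] using h3)]]
          rw [ih, e1, e2,
            show List.filter (fun i => pvIsHeap i)
                (x :: List.filter (fun i => !pvIsInd i) (List.filter (fun i => !pvIsStack i) xs))
                = List.filter (fun i => pvIsHeap i)
                    (List.filter (fun i => !pvIsInd i) (List.filter (fun i => !pvIsStack i) xs)) from by
              rw [List.filter_cons_of_neg (by simpa using h3)]]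
          simp only [List.length_cons, Nat.cast_add, Nat.cast_one, PySem.Dict.mk.injEq,
            List.cons.injEq, Prod.mk.injEq, true_and, and_true]
          omega

-- A's outer loop over the functions list: the sieve quantities of the flattened instruction list.
lemma pv_outer (funcs : List (List (String × List String))) (a b c e : Int) :
    funcs.foldl (fun pats func => ((PySem.Dict.mk func).getD "instructions" []).foldl pvStepA pats)
      (PySem.Dict.mk [("stack_access", a), ("heap_access", b), ("global_access", c), ("indirect_access", e)]) =
    (let L := funcs.flatMap (fun func => (PySem.Dict.mk func).getD "instructions" [])
     PySem.Dict.mk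
      [("stack_access", a + ((L.length : Int) - ((L.filter (fun i => !pvIsStack i)).length : Int))),
       ("heap_access", b + ((((L.filter (fun i => !pvIsStack i)).filter (fun i => !pvIsInd i)).filter (fun i => pvIsHeap i)).length : Int)),
       ("global_access", c),
       ("indirect_access", e + (((L.filter (fun i => !pvIsStack i)).length : Int) - (((L.filter (fun i => !pvIsStack i)).filter (fun i => !pvIsInd i)).length : Int)))]) := by
  induction funcs generalizing a b c e with
  | nil => simp
  | cons f fs ih =>
    have h1 : ∀ (l : List String), (l.filter (fun i => !pvIsStack i)).length ≤ l.length :=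
      fun l => List.length_filter_le _ _
    have h2 : ∀ (l : List String), ((l.filter (fun i => !pvIsStack i)).filter (fun i => !pvIsInd i)).length ≤ (l.filter (fun i => !pvIsStack i)).length :=
      fun l => List.length_filter_le _ _
    rw [List.foldl_cons, pv_inner, ih]
    simp only [List.flatMap_cons, List.filter_append, List.length_append]
    norm_num
    refine ⟨by omega, by omega⟩

-- ===== VERDICT =====
theorem extract_memory_patterns_py_spec : Claim_equal_extract_memory_patterns_py := by
  unfold Claim_equal_extract_memory_patterns_py
  intro code_data _
  unfold Spec_extract_memory_patterns_py extract_memory_patterns_py extract_memory_patterns_py_alt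
  dsimp only
  by_cases hg : ((PySem.Dict.mk code_data).getD "objdump_output" []) ≠ [] ∧
      (PySem.Dict.mk ((PySem.Dict.mk code_data).getD "objdump_output" [])).contains "functions" = true
  · rw [if_pos hg, if_pos hg, pv_outer,
        PySem.List.foldl_append_eq_flatMap (g := fun func => (PySem.Dict.mk func).getD "instructions" [])]
    simp
  · rw [if_neg hg, if_neg hg]
    rfl
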